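-- pv_equiv track=rewrite | github.com/wowMalow/DocumentParser | autoglossary/glossary.py | _combine_variations
-- ===== SOURCE A (Python) =====
-- from typing import List
--
-- def _combine_variations(variations_fold: dict) -> List[List[str]]:
--     variations = []
--     def recursive_combinations(variations_fold, i, alternative):
--         if i not in variations_fold.keys():
--             variations.append(alternative)
--         else:
--             for word in variations_fold[i]:
--                 if i == 0:
--                     recursive_combinations(variations_fold, i+1, alternative + word)
--                 else:
--                     recursive_combinations(variations_fold, i+1, alternative + " " + word)
--
--     recursive_combinations(variations_fold, 0, "")
--     return variations
-- ===== SOURCE B (Python) =====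
-- from typing import List
-- import itertools
--
-- def _combine_variations(variations_fold: dict) -> List[List[str]]:
--     levels = []
--     i = 0
--     while i in variations_fold:
--         levels.append(variations_fold[i])
--         i += 1
--     return [' '.join(combo) for combo in itertools.product(*levels)]
-- ===== Notes on version B (the rewrite author's own statement) =====
-- stated objective: idiomatic
-- what changed: Replaced A's nested recursive string-accumulating backtracking with an iterative collection of the consecutive levels followed by itertools.product and ' '.join of each combination.
import Mathlib
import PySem

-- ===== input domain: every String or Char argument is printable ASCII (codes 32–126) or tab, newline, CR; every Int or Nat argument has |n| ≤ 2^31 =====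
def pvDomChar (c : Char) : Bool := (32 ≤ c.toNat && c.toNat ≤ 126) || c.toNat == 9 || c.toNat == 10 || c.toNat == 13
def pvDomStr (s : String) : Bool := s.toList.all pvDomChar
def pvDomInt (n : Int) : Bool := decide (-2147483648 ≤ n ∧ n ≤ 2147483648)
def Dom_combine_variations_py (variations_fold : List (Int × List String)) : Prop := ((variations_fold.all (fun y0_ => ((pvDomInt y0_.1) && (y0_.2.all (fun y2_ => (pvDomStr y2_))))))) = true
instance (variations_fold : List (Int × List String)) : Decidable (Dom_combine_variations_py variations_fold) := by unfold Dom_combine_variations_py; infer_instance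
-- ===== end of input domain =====

-- B replaces A's appending recursion by collecting the consecutive levels and taking their
-- Cartesian product, joining each combination with ' ' (objective: idiomatic/alternative).

-- ===== PORT A =====
-- A's inner recursion; 'fuel' only makes the recursion structural: with fuel = |d| + 1
-- (as combine_variations_py calls it) the fuel-0 branch is unreachable, since the keys
-- 0..i can never all occur in a list of fewer than i+1 pairs.
def combineGoA (d : PySem.Dict Int (List String)) : Nat → Int → String → List String → List String
  | 0, _, alternative, variations => variations ++ [alternative]
  | fuel+1, i, alternative, variations =>
    match d.get? i with
    | none => variations ++ [alternative]
    | some words =>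
      words.foldl (fun acc word =>
        if i == 0 then combineGoA d fuel (i+1) (alternative ++ word) acc
        else combineGoA d fuel (i+1) (alternative ++ " " ++ word) acc) variations

def combine_variations_py (variations_fold : List (Int × List String)) : List String :=
  combineGoA (PySem.Dict.mk variations_fold) (variations_fold.length + 1) 0 "" []

-- ===== PORT B =====
-- Source B's while loop: collect variations_fold[0], variations_fold[1], … while the key exists
-- (same fuel note as above: the fuel-0 branch is unreachable at fuel = |d| + 1).
def combineLevels (d : PySem.Dict Int (List String)) : Nat → Int → List (List String)
  | 0, _ => []
  | fuel+1, i =>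
    match d.get? i with
    | none => []
    | some ws => ws :: combineLevels d fuel (i+1)

-- itertools.product(*levels), rightmost list varying fastest; product of no lists = [[]].
def combineProduct : List (List String) → List (List String)
  | [] => [[]]
  | l :: ls => l.flatMap (fun w => (combineProduct ls).map (fun t => w :: t))

def combine_variations_py_alt (variations_fold : List (Int × List String)) : List String :=
  (combineProduct (combineLevels (PySem.Dict.mk variations_fold) (variations_fold.length + 1) 0)).map
    (fun combo => PySem.Str.join " " combo)

-- ===== PRECONDITION & SPEC =====
def Spec_combine_variations_py (variations_fold : List (Int × List String)) (out : List String) : Prop := out = combine_variations_py_alt variations_fold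
instance (variations_fold : List (Int × List String)) (out : List String) : Decidable (Spec_combine_variations_py variations_fold out) := by unfold Spec_combine_variations_py; infer_instance

-- ===== CLAIM (what is proved, stated in full; the proofs are below) =====
def Claim_equal_combine_variations_py : Prop := ∀ (variations_fold : List (Int × List String)), Dom_combine_variations_py variations_fold → Spec_combine_variations_py variations_fold (combine_variations_py variations_fold)

-- ===== LEMMAS AND PROOFS =====

-- ' '.join(w :: t) is the left fold appending " " ++ x, started at w.
theorem joinSpace (t : List String) (w : String) :
    PySem.Str.join " " (w :: t) = t.foldl (fun a x => a ++ " " ++ x) w := by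
  induction t generalizing w with
  | nil => simp [PySem.Str.join, PySem.Chars.join_singleton, String.ofList_toList]
  | cons x t ih =>
    rw [List.foldl_cons, ← ih (w ++ " " ++ x)]
    apply String.toList_inj.mp
    cases t with
    | nil =>
      simp [PySem.Str.toList_join, PySem.Chars.join_singleton, PySem.Chars.join_cons_cons,
        String.toList_append]
    | cons y t =>
      simp [PySem.Str.toList_join, PySem.Chars.join_cons_cons, String.toList_append]

-- A 'for' loop of recursive calls each appending to the accumulator is acc ++ flatMap.
theorem foldlStep {f : String → List String → List String} {g : String → List String} :
    ∀ (ws : List String), (∀ w ∈ ws, ∀ acc, f w acc = acc ++ g w) →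
    ∀ (acc : List String), ws.foldl (fun acc w => f w acc) acc = acc ++ ws.flatMap g := by
  intro ws
  induction ws with
  | nil => intro _ acc; simp
  | cons w ws ih =>
    intro h acc
    rw [List.foldl_cons, h w (by simp), ih (fun w hw acc => h w (by simp [hw]) acc),
      List.flatMap_cons, List.append_assoc]

-- Core invariant: for i ≥ 1 and ANY fuel, A's recursion from accumulator acc appends the
-- folds of all combinations of the remaining levels, in product order.
theorem combineGoA_eq (d : PySem.Dict Int (List String)) :
    ∀ (fuel : Nat) (i : Int) (alt : String) (acc : List String), 1 ≤ i →
    combineGoA d fuel i alt acc =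
      acc ++ (combineProduct (combineLevels d fuel i)).map
        (fun t => t.foldl (fun a x => a ++ " " ++ x) alt) := by
  intro fuel
  induction fuel with
  | zero => intro i alt acc _; simp [combineGoA, combineLevels, combineProduct]
  | succ fuel ih =>
    intro i alt acc hi
    have hne : (i == 0) = false := by simp; omega
    cases hget : d.get? i with
    | none => simp [combineGoA, combineLevels, hget, combineProduct]
    | some ws =>
      simp only [combineGoA, combineLevels, hget, hne, Bool.false_eq_true, if_false]
      have hstep : ∀ (acc : List String) (w : String), w ∈ ws →
          combineGoA d fuel (i+1) (alt ++ " " ++ w) acc =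
            acc ++ ((combineProduct (combineLevels d fuel (i+1))).map
              (fun t => t.foldl (fun a x => a ++ " " ++ x) (alt ++ " " ++ w))) := by
        intro acc w _; exact ih (i+1) (alt ++ " " ++ w) acc (by omega)
      rw [foldlStep ws (fun w _ acc => hstep acc w (by assumption)) acc]
      simp [combineProduct, List.map_flatMap, List.map_map, Function.comp_def, List.foldl_cons]

-- ===== VERDICT (by name: the statement is the Claim_ definition above) =====
theorem combine_variations_py_spec : Claim_equal_combine_variations_py := by
  intro d0 _
  unfold Spec_combine_variations_py combine_variations_py combine_variations_py_alt
  set d : PySem.Dict Int (List String) := PySem.Dict.mk d0 with hd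
  cases hget : d.get? 0 with
  | none =>
    simp [combineGoA, combineLevels, hget, combineProduct, PySem.Str.join,
      PySem.Chars.join_nil]
  | some ws =>
    simp only [combineGoA, combineLevels, hget, beq_self_eq_true, if_true]
    have hstep : ∀ (acc : List String) (w : String), w ∈ ws →
        combineGoA d d0.length (0+1) ("" ++ w) acc =
          acc ++ ((combineProduct (combineLevels d d0.length (0+1))).map
            (fun t => t.foldl (fun a x => a ++ " " ++ x) ("" ++ w))) := by
      intro acc w _; exact combineGoA_eq d d0.length (0+1) ("" ++ w) acc (by omega)
    rw [foldlStep ws (fun w _ acc => hstep acc w (by assumption)) []]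
    simp [combineProduct, List.map_flatMap, List.map_map, Function.comp_def, joinSpace]
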